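-- pv_equiv track=rewrite | github.com/NikitaLoik/mRNADisplayResults_Analysis | utility_functions.py | hamming_distance_based_formating
-- ===== SOURCE A (Python) =====
-- def hamming_distance_based_formating(
--         sequence_1: str,
--         sequence_2: str,
--         ) -> str:
--     '''
--     # returns formated sequence,
--     # such that mismatches are capitalised,
--     # and the rest of the formated sequence is lowercase
--     '''
--
--     if len(sequence_1) < len(sequence_2):
--         sequence_1 = sequence_1 + (len(sequence_2) - len(sequence_1)) * '-'
--     elif len(sequence_1) > len(sequence_2):
--         sequence_2 = sequence_2 + (len(sequence_1) - len(sequence_2)) * '-'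
--
--     hamming_distance = 0
--     formated_sequence_2 = ''
--     for i in range(len(sequence_1)):
--         if sequence_1[i] == sequence_2[i]:
--             formated_sequence_2 += sequence_2[i].lower()
--             hamming_distance = hamming_distance
--         else:
--             formated_sequence_2 += sequence_2[i]
--             hamming_distance = hamming_distance + 1
--     return formated_sequence_2
-- ===== SOURCE B (Python) =====
-- def hamming_distance_based_formating(
--         sequence_1: str,
--         sequence_2: str,
--         ) -> str:
--     # Matched positions are lowercased, mismatches kept as-is (A's actual behaviour).
--     # No padding pass: zip the common prefix; a longer sequence_2 tail is unchanged
--     # (comparing against '-' either keeps the char or lowercases '-' to '-'),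
--     # and a longer sequence_1 turns the missing tail of sequence_2 into '-'s.
--     body = ''.join(
--         c2.lower() if c1 == c2 else c2
--         for c1, c2 in zip(sequence_1, sequence_2))
--     return (body
--             + sequence_2[len(sequence_1):]
--             + '-' * max(len(sequence_1) - len(sequence_2), 0))
-- ===== Notes on version B (the rewrite author's own statement) =====
-- stated objective: simpler
-- what changed: Replaces the pad-to-equal-length-then-index loop by a zip over the common prefix plus closed-form tails (the extra tail of sequence_2 is provably unchanged, the missing tail becomes '-'s), dropping the padding branches, index access and the dead hamming_distance accumulator.
import Mathlib
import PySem

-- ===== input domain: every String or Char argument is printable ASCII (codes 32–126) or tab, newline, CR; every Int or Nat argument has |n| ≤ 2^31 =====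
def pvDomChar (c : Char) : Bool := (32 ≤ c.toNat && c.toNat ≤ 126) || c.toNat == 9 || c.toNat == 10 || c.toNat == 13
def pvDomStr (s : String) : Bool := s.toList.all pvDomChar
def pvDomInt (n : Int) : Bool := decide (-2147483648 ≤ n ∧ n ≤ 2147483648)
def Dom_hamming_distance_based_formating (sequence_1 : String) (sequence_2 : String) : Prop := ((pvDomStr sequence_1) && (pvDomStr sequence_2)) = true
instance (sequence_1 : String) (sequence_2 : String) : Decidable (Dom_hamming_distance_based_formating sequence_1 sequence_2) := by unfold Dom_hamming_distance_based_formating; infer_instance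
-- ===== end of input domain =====

-- B replaces A's pad-then-index loop (and its dead hamming_distance accumulator) by a zip
-- over the common prefix plus closed-form tails; objective: simpler.

-- ===== PORT A =====
-- literal port of A: pad the shorter sequence with '-', then an index loop that also
-- carries the (unused) hamming_distance counter, appending one char per step
def hamming_distance_based_formating (sequence_1 : String) (sequence_2 : String) : String :=
  let l1 := sequence_1.toList
  let l2 := sequence_2.toList
  let l1 := if l1.length < l2.length then l1 ++ List.replicate (l2.length - l1.length) '-' else l1
  let l2 := if sequence_1.toList.length > sequence_2.toList.length then l2 ++ List.replicate (sequence_1.toList.length - l2.length) '-' else l2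
  let st := (PySem.List.pyRange 0 (l1.length : Int) 1).foldl
    (fun (st : List Char × Int) i =>
      if PySem.List.pyGetD l1 i ' ' = PySem.List.pyGetD l2 i ' ' then
        (st.1 ++ [PySem.Chars.lowerChar (PySem.List.pyGetD l2 i ' ')], st.2)
      else
        (st.1 ++ [PySem.List.pyGetD l2 i ' '], st.2 + 1))
    ([], 0)
  String.ofList st.1

-- ===== PORT B =====
-- literal port of Source B: lowercase matches over zip(s1, s2), then s2[len(s1):],
-- then '-' * max(len(s1) - len(s2), 0)
def hamming_distance_based_formating_alt (sequence_1 : String) (sequence_2 : String) : String :=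
  let l1 := sequence_1.toList
  let l2 := sequence_2.toList
  let body := (l1.zip l2).map (fun p => if p.1 = p.2 then PySem.Chars.lowerChar p.2 else p.2)
  String.ofList (body ++ l2.drop l1.length ++ List.replicate (max (l1.length - l2.length) 0) '-')

-- ===== PRECONDITION & SPEC =====
def Spec_hamming_distance_based_formating (sequence_1 : String) (sequence_2 : String) (out : String) : Prop := out = hamming_distance_based_formating_alt sequence_1 sequence_2
instance (sequence_1 : String) (sequence_2 : String) (out : String) : Decidable (Spec_hamming_distance_based_formating sequence_1 sequence_2 out) := by unfold Spec_hamming_distance_based_formating; infer_instance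

-- ===== CLAIM (what is proved, stated in full; the proofs are below) =====
def Claim_equal_hamming_distance_based_formating : Prop := ∀ (sequence_1 : String) (sequence_2 : String), Dom_hamming_distance_based_formating sequence_1 sequence_2 → Spec_hamming_distance_based_formating sequence_1 sequence_2 (hamming_distance_based_formating sequence_1 sequence_2)

-- ===== LEMMAS AND PROOFS =====

-- the pair-state fold of A, projected to its string component, is a map
lemma foldA_fst (r : List Int) (l1 l2 : List Char) (acc : List Char) (h : Int) :
    (r.foldl
      (fun (st : List Char × Int) i =>
        if PySem.List.pyGetD l1 i ' ' = PySem.List.pyGetD l2 i ' ' then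
          (st.1 ++ [PySem.Chars.lowerChar (PySem.List.pyGetD l2 i ' ')], st.2)
        else
          (st.1 ++ [PySem.List.pyGetD l2 i ' '], st.2 + 1))
      (acc, h)).1
    = acc ++ r.map (fun i =>
        if PySem.List.pyGetD l1 i ' ' = PySem.List.pyGetD l2 i ' ' then
          PySem.Chars.lowerChar (PySem.List.pyGetD l2 i ' ')
        else PySem.List.pyGetD l2 i ' ') := by
  induction r generalizing acc h with
  | nil => simp
  | cons x t ih =>
    simp only [List.foldl_cons, List.map_cons]
    split_ifs <;> simp [ih]

-- the index map over two equal-length lists is the zip map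
lemma map_range_two (l1 l2 : List Char) (hlen : l1.length = l2.length)
    (f : Char → Char → Char) :
    (PySem.List.pyRange 0 (l1.length : Int) 1).map
      (fun i => f (PySem.List.pyGetD l1 i ' ') (PySem.List.pyGetD l2 i ' '))
    = (l1.zip l2).map (fun p => f p.1 p.2) := by
  induction l1 generalizing l2 with
  | nil => simp [PySem.List.pyRange_one_eq_nil]
  | cons c t ih =>
    cases l2 with
    | nil => simp at hlen
    | cons d u =>
      have h1 : (0 : Int) < ((c :: t).length : Int) := by simp
      rw [PySem.List.pyRange_one_cons h1, List.map_cons, List.zip_cons_cons, List.map_cons]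
      have hlen' : t.length = u.length := by simpa using hlen
      have hshift : PySem.List.pyRange (0 + 1) ((c :: t).length : Int) 1
          = (PySem.List.pyRange 0 (t.length : Int) 1).map (· + 1) := by
        rw [PySem.List.pyRange_one, PySem.List.pyRange_one, List.map_map]
        have he : (((c :: t).length : Int) - (0 + 1)).toNat = ((t.length : Int) - 0).toNat := by
          simp
        rw [he]
        apply List.map_congr_left; intro k _; simp; ring
      rw [hshift, List.map_map]
      congr 1
      · simp [PySem.List.pyGetD]
      · rw [← ih u hlen']
        apply List.map_congr_left
        intro i hi
        have hi' : 0 ≤ i ∧ i < (t.length : Int) := by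
          simpa [PySem.List.mem_pyRange_one] using hi
        simp only [Function.comp]
        have g1 : PySem.List.pyGetD (c :: t) (i + 1) ' ' = PySem.List.pyGetD t i ' ' := by
          obtain ⟨k, rfl⟩ : ∃ k : Nat, i = (k : Int) := ⟨i.toNat, by omega⟩
          rw [show ((k : Int) + 1) = ((k + 1 : Nat) : Int) by push_cast; ring,
            PySem.List.pyGetD_natCast, PySem.List.pyGetD_natCast]
          simp
        have g2 : PySem.List.pyGetD (d :: u) (i + 1) ' ' = PySem.List.pyGetD u i ' ' := by
          obtain ⟨k, rfl⟩ : ∃ k : Nat, i = (k : Int) := ⟨i.toNat, by omega⟩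
          rw [show ((k : Int) + 1) = ((k + 1 : Nat) : Int) by push_cast; ring,
            PySem.List.pyGetD_natCast, PySem.List.pyGetD_natCast]
          simp
        rw [g1, g2]

-- zipping against a truncated partner is zipping against the partner
lemma zip_take_right' {A : Type} (l1 l2 : List A) : l1.zip (l2.take l1.length) = l1.zip l2 := by
  induction l1 generalizing l2 with
  | nil => simp
  | cons c t ih =>
    cases l2 with
    | nil => simp
    | cons d u => simp [ih]

lemma zip_take_left' {A : Type} (l1 l2 : List A) : (l1.take l2.length).zip l2 = l1.zip l2 := by
  induction l1 generalizing l2 with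
  | nil => simp
  | cons c t ih =>
    cases l2 with
    | nil => simp
    | cons d u => simp [ih]

-- '-' is already lowercase
lemma lower_dash : PySem.Chars.lowerChar '-' = '-' := by decide

-- the zip map against a '-' pad on the left leaves the chars unchanged
lemma zip_pad_left (pad u : List Char) (hp : ∀ c ∈ pad, c = '-') :
    ((pad.zip u).map (fun p => if p.1 = p.2 then PySem.Chars.lowerChar p.2 else p.2))
      = u.take pad.length := by
  induction pad generalizing u with
  | nil => simp
  | cons c t ih =>
    cases u with
    | nil => simp
    | cons d v =>
      have hc : c = '-' := hp c (by simp)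
      simp only [List.zip_cons_cons, List.map_cons, List.length_cons, List.take_succ_cons]
      congr 1
      · subst hc
        by_cases h : '-' = d
        · simp [← h, lower_dash]
        · simp [h]
      · exact ih v (fun x hx => hp x (by simp [hx]))

-- the zip map against a '-' pad on the right gives '-'s
lemma zip_pad_right (t pad : List Char) (hp : ∀ c ∈ pad, c = '-') :
    ((t.zip pad).map (fun p => if p.1 = p.2 then PySem.Chars.lowerChar p.2 else p.2))
      = List.replicate (min t.length pad.length) '-' := by
  induction t generalizing pad with
  | nil => simp
  | cons c u ih =>
    cases pad with
    | nil => simp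
    | cons d v =>
      have hd : d = '-' := hp d (by simp)
      simp only [List.zip_cons_cons, List.map_cons, List.length_cons]
      rw [show min (u.length + 1) (v.length + 1) = min u.length v.length + 1 by omega,
        List.replicate_succ]
      congr 1
      · subst hd
        by_cases h : c = '-'
        · simp [h, lower_dash]
        · simp [h]
      · exact ih v (fun x hx => hp x (by simp [hx]))

-- ===== VERDICT (by name: the statement is the Claim_ definition above) =====
theorem hamming_distance_based_formating_spec : Claim_equal_hamming_distance_based_formating := by
  intro s1 s2 _
  unfold Spec_hamming_distance_based_formating hamming_distance_based_formating hamming_distance_based_formating_alt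
  set l1 := s1.toList with hl1
  set l2 := s2.toList with hl2
  simp only
  rcases lt_trichotomy l1.length l2.length with hlt | heq | hgt
  · -- sequence_1 padded with '-'
    have hnotgt : ¬ l1.length > l2.length := by omega
    rw [if_pos hlt, if_neg hnotgt]
    set L1 := l1 ++ List.replicate (l2.length - l1.length) '-' with hL1
    have hlen : L1.length = l2.length := by simp [hL1]; omega
    rw [foldA_fst, List.nil_append,
      map_range_two L1 l2 hlen (fun a b => if a = b then PySem.Chars.lowerChar b else b)]
    have hz : L1.zip l2 = l1.zip (l2.take l1.length)
        ++ (List.replicate (l2.length - l1.length) '-').zip (l2.drop l1.length) := by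
      conv_lhs => rw [hL1, ← List.take_append_drop l1.length l2]
      rw [List.zip_append (by simp; omega)]
      simp
    rw [hz, List.map_append, zip_take_right',
      zip_pad_left _ _ (fun c hc => List.eq_of_mem_replicate hc)]
    have hd : (l2.drop l1.length).take (List.replicate (l2.length - l1.length) '-').length
        = l2.drop l1.length := by
      apply List.take_of_length_le; simp
    rw [hd]
    have hmax : max (l1.length - l2.length) 0 = 0 := by omega
    rw [hmax]
    simp
  · -- equal lengths: no padding
    have h1 : ¬ l1.length < l2.length := by omega
    have h2 : ¬ l1.length > l2.length := by omega
    rw [if_neg h1, if_neg h2]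
    rw [foldA_fst, List.nil_append,
      map_range_two l1 l2 heq (fun a b => if a = b then PySem.Chars.lowerChar b else b)]
    have hmax : max (l1.length - l2.length) 0 = 0 := by omega
    rw [hmax, heq, List.drop_length]
    simp
  · -- sequence_2 padded with '-'
    have h1 : ¬ l1.length < l2.length := by omega
    rw [if_neg h1, if_pos hgt]
    set L2 := l2 ++ List.replicate (l1.length - l2.length) '-' with hL2
    have hlen : l1.length = L2.length := by simp [hL2]; omega
    rw [foldA_fst, List.nil_append,
      map_range_two l1 L2 hlen (fun a b => if a = b then PySem.Chars.lowerChar b else b)]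
    have hz : l1.zip L2 = (l1.take l2.length).zip l2
        ++ (l1.drop l2.length).zip (List.replicate (l1.length - l2.length) '-') := by
      conv_lhs => rw [hL2, ← List.take_append_drop l2.length l1]
      rw [List.zip_append (by simp; omega)]
      simp
    rw [hz, List.map_append, zip_take_left',
      zip_pad_right _ _ (fun c hc => List.eq_of_mem_replicate hc)]
    have hmin : min (l1.drop l2.length).length (List.replicate (l1.length - l2.length) '-').length
        = l1.length - l2.length := by simp
    rw [hmin]
    have hdrop : l2.drop l1.length = [] := by
      apply List.drop_eq_nil_of_le; omega
    rw [hdrop]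
    simp
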